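-- pv_equiv track=rewrite | github.com/huangyunict/euler_project | solutions/solution_346.py | solve_p346
-- ===== SOURCE A (Python) =====
-- def calc_rep_unit(b: int, k: int) -> int:
--     assert (pow(b,k)-1)%(b-1) == 0
--     return (pow(b, k) - 1) // (b - 1)
--
-- def solve_p346(n: int) -> int:
--     rep_units = set()
--     rep_units.add(1)
--     early_exit = False
--     for b in range(2, n):
--         k = 3
--         while True:
--             m = calc_rep_unit(b, k)
--             if m >= n:
--                 if k == 3:
--                     early_exit = True
--                 break
--             rep_units.add(m)
--             k += 1
--         if early_exit:
--             break
--     return sum(rep_units)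
-- ===== SOURCE B (Python) =====
-- def solve_p346(n: int) -> int:
--     # Direct summation with minimal-base dedup: count each strong repunit once,
--     # at its smallest base, detecting other representations by per-length binary search
--     # over bases; the search's upper bound hi shrinks monotonically as the length grows.
--     def repunit(b, k):
--         return (b ** k - 1) // (b - 1)
--
--     def seen_in_smaller_base(m, b):
--         # is m a repunit of length >= 4 in some base 2..b-1 ?
--         j = 4
--         hi = b - 1
--         while hi >= 2 and 2 ** j - 1 <= m:
--             lo = 2
--             while lo <= hi:
--                 mid = (lo + hi) // 2
--                 v = repunit(mid, j)
--                 if v == m: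
--                     return True
--                 if v < m:
--                     lo = mid + 1
--                 else:
--                     hi = mid - 1
--             j += 1
--         return False
--
--     total = 1
--     b = 2
--     while repunit(b, 3) < n:
--         k = 3
--         while True:
--             m = repunit(b, k)
--             if m >= n:
--                 break
--             if not seen_in_smaller_base(m, b):
--                 total += m
--             k += 1
--         b += 1
--     return total
-- ===== Notes on version B (the rewrite author's own statement) =====
-- stated objective: alternative
-- what changed: B keeps no set: it sums repunits directly into an integer accumulator, counting each value exactly once at its smallest base by testing, via a per-length binary search over bases, whether the value is also a repunit of length >= 4 in a smaller base; A instead dumps every repunit into a set and sums the set.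
import Mathlib
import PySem

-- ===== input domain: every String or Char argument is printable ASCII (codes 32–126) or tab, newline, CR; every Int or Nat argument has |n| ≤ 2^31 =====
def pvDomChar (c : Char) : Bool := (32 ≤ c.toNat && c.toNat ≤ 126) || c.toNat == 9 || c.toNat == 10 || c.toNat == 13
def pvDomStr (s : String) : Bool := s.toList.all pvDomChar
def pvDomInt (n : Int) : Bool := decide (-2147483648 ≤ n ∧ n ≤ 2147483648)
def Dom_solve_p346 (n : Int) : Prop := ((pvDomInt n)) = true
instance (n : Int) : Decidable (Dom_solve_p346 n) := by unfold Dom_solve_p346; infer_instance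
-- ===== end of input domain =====

-- B replaces A's set-then-sum by a direct accumulator that counts each repunit once,
-- at its smallest base, using a per-length binary search for smaller-base representations; objective: alternative.

-- pvGeom b k = 1 + b + … + b^(k-1); used to justify termination of the loops below
def pvGeom (b : Int) : Nat → Int
  | 0 => 0
  | k + 1 => pvGeom b k + b ^ k

theorem pvGeom_mul_pred (b : Int) (k : Nat) : (b - 1) * pvGeom b k = b ^ k - 1 := by
  induction k with
  | zero => simp [pvGeom]
  | succ k ih => rw [pvGeom, mul_add, ih, pow_succ]; ring

theorem pvCalc_eq (b : Int) (hb : 2 ≤ b) (k : Nat) :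
    PySem.Int.floordiv (b ^ k - 1) (b - 1) = pvGeom b k := by
  rw [PySem.Int.floordiv_eq_ediv_of_pos (by omega), ← pvGeom_mul_pred]
  exact Int.mul_ediv_cancel_left _ (by omega)

theorem pvGeom_succ_ge (b : Int) (hb : 1 ≤ b) (k : Nat) : pvGeom b k + 1 ≤ pvGeom b (k + 1) := by
  have h : (0:Int) < b ^ k := pow_pos (by omega) k
  simp only [pvGeom]; omega

theorem pvGeom_strict_b {b : Int} (hb : 1 ≤ b) {k : Nat} (hk : 2 ≤ k) :
    pvGeom b k + 1 ≤ pvGeom (b + 1) k := by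
  induction k, hk using Nat.le_induction with
  | base => simp only [pvGeom, pow_zero, pow_one]; omega
  | succ k hk ih =>
    have hp : b ^ k ≤ (b + 1) ^ k := pow_le_pow_left₀ (by omega) (by omega) k
    simp only [pvGeom]; omega

-- ===== PORT A =====
-- calc_rep_unit; the assert always holds at A's call sites (b ≥ 2), so it is not modelled.
-- pow(b,k) is only called with k ≥ 3, so b ^ k.toNat is exact there.
def calcRepUnit (b k : Int) : Int :=
  PySem.Int.floordiv (b ^ k.toNat - 1) (b - 1)

-- inner 'while True' of A: returns (updated set, early_exit flag of this b)
def loopKA (n b : Int) (hb : 2 ≤ b) (s : PySem.Set Int) (k : Int) (hk : 3 ≤ k) :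
    PySem.Set Int × Bool :=
  let m := calcRepUnit b k
  if h : n ≤ m then (s, decide (k = 3))
  else loopKA n b hb (PySem.Set.add s m) (k + 1) (by omega)
termination_by (n - calcRepUnit b k).toNat
decreasing_by
  have hc : (k + 1).toNat = k.toNat + 1 := by omega
  have h1 : calcRepUnit b k = pvGeom b k.toNat := pvCalc_eq b hb k.toNat
  have h2 : calcRepUnit b (k + 1) = pvGeom b (k.toNat + 1) := by
    rw [calcRepUnit, hc]; exact pvCalc_eq b hb (k.toNat + 1)
  have h3 := pvGeom_succ_ge b (by omega) k.toNat
  omega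

-- 'for b in range(2, n)' with the early_exit break
def loopBA (n : Int) (s : PySem.Set Int) (b : Int) (hb : 2 ≤ b) : PySem.Set Int :=
  if h : b < n then
    let r := loopKA n b hb s 3 (by omega)
    if r.2 then r.1 else loopBA n r.1 (b + 1) (by omega)
  else s
termination_by (n - b).toNat
decreasing_by omega

def solve_p346 (n : Int) : Int :=
  List.sum (loopBA n (PySem.Set.add PySem.Set.empty 1) 2 (by omega))

-- ===== PORT B =====
-- repunit helper of Source B (every call site has b ≥ 2)
def pvRep (b k : Int) : Int :=
  PySem.Int.floordiv (b ^ k.toNat - 1) (b - 1)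

-- inner binary search of seen_in_smaller_base over bases lo..hi for a repunit of
-- length j equal to m; also returns the (possibly shrunk) upper bound hi
def bsearchB (m j : Int) (hj : 4 ≤ j) (lo hi : Int) (hlo : 2 ≤ lo) : Bool × Int :=
  if h : lo ≤ hi then
    let mid := PySem.Int.floordiv (lo + hi) 2
    let v := pvRep mid j
    if v = m then (true, hi)
    else if v < m then bsearchB m j hj (PySem.Int.floordiv (lo + hi) 2 + 1) hi (by
      have := PySem.Int.floordiv_eq_ediv_of_pos (a := lo + hi) (b := (2:Int)) (by omega)
      omega)
    else bsearchB m j hj lo (PySem.Int.floordiv (lo + hi) 2 - 1) hlo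
  else (false, hi)
termination_by (hi - lo + 1).toNat
decreasing_by
  all_goals
    have := PySem.Int.floordiv_eq_ediv_of_pos (a := lo + hi) (b := (2:Int)) (by omega)
    omega

-- the 'while hi >= 2 and 2 ** j - 1 <= m' loop of seen_in_smaller_base
def seenLoop (m j hi : Int) (hj : 4 ≤ j) : Bool :=
  if h : 2 ≤ hi ∧ 2 ^ j.toNat - 1 ≤ m then
    let r := bsearchB m j hj 2 hi (le_refl _)
    if r.1 then true else seenLoop m (j + 1) r.2 (by omega)
  else false
termination_by (m + 2 - 2 ^ j.toNat).toNat
decreasing_by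
  have hc : (j + 1).toNat = j.toNat + 1 := by omega
  have h2 : (0:Int) < 2 ^ j.toNat := pow_pos (by omega) _
  rw [hc]
  omega

def seenSmaller (m b : Int) : Bool := seenLoop m 4 (b - 1) (by omega)

-- inner 'while True' over k of Source B
def loopKAlt (n b : Int) (hb : 2 ≤ b) (total k : Int) (hk : 3 ≤ k) : Int :=
  let m := pvRep b k
  if h : n ≤ m then total
  else loopKAlt n b hb (if seenSmaller m b then total else total + m) (k + 1) (by omega)
termination_by (n - pvRep b k).toNat
decreasing_by
  have hc : (k + 1).toNat = k.toNat + 1 := by omega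
  have h1 : pvRep b k = pvGeom b k.toNat := pvCalc_eq b hb k.toNat
  have h2 : pvRep b (k + 1) = pvGeom b (k.toNat + 1) := by
    rw [pvRep, hc]; exact pvCalc_eq b hb (k.toNat + 1)
  have h3 := pvGeom_succ_ge b (by omega) k.toNat
  omega

-- outer 'while repunit(b, 3) < n' loop of Source B
def loopBAlt (n total b : Int) (hb : 2 ≤ b) : Int :=
  if h : pvRep b 3 < n then
    loopBAlt n (loopKAlt n b hb total 3 (by omega)) (b + 1) (by omega)
  else total
termination_by (n - pvRep b 3).toNat
decreasing_by
  have h1 : pvRep b 3 = pvGeom b 3 := pvCalc_eq b (by omega) 3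
  have h2 : pvRep (b + 1) 3 = pvGeom (b + 1) 3 := pvCalc_eq (b + 1) (by omega) 3
  have h3 := pvGeom_strict_b (b := b) (by omega) (k := 3) (by omega)
  omega

def solve_p346_alt (n : Int) : Int := loopBAlt n 1 2 (by omega)

-- ===== PRECONDITION & SPEC =====
def Spec_solve_p346 (n : Int) (out : Int) : Prop := out = solve_p346_alt n
instance (n : Int) (out : Int) : Decidable (Spec_solve_p346 n out) := by unfold Spec_solve_p346; infer_instance

-- ===== CLAIM (what is proved, stated in full; the proofs are below) =====
def Claim_equal_solve_p346 : Prop := ∀ (n : Int), Dom_solve_p346 n → Spec_solve_p346 n (solve_p346 n)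

-- ===== LEMMAS AND PROOFS =====

theorem pvGeom_mono_k (b : Int) (hb : 1 ≤ b) {k k' : Nat} (h : k ≤ k') :
    pvGeom b k ≤ pvGeom b k' := by
  induction k', h using Nat.le_induction with
  | base => exact le_refl _
  | succ k' hk ih => exact le_trans ih (by have := pvGeom_succ_ge b hb k'; omega)

theorem pvGeom_mono_b {b b' : Int} (hb : 0 ≤ b) (h : b ≤ b') (k : Nat) :
    pvGeom b k ≤ pvGeom b' k := by
  induction k with
  | zero => simp [pvGeom]
  | succ k ih =>
    simp only [pvGeom]
    exact add_le_add ih (pow_le_pow_left₀ hb h k)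

theorem pvGeom_lt_b {b b' : Int} (hb : 1 ≤ b) (h : b < b') {k : Nat} (hk : 2 ≤ k) :
    pvGeom b k < pvGeom b' k := by
  have h1 := pvGeom_strict_b hb hk
  have h2 : pvGeom (b + 1) k ≤ pvGeom b' k := pvGeom_mono_b (by omega) (by omega) k
  omega

theorem pvGeom_two (k : Nat) : pvGeom 2 k = 2 ^ k - 1 := by
  have := pvGeom_mul_pred 2 k; simpa using this


-- x has a strong-repunit representation in a base smaller than b
def pvRepIn (x b : Int) : Prop :=
  ∃ b' : Int, 2 ≤ b' ∧ b' < b ∧ ∃ j : Nat, 4 ≤ j ∧ pvGeom b' j = x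

theorem bsearchB_fst_iff (m j : Int) (hj : 4 ≤ j) (lo hi : Int) (hlo : 2 ≤ lo) :
    (bsearchB m j hj lo hi hlo).1 = true ↔
      ∃ x : Int, lo ≤ x ∧ x ≤ hi ∧ pvGeom x j.toNat = m := by
  fun_induction bsearchB m j hj lo hi hlo with
  | case1 lo hi hlo hle mid v hv =>
    have hm := PySem.Int.floordiv_eq_ediv_of_pos (a := lo + hi) (b := (2:Int)) (by omega)
    have hmid1 : lo ≤ mid := by simp only [mid]; omega
    have hmid2 : mid ≤ hi := by simp only [mid]; omega
    have hv' : pvGeom mid j.toNat = m := by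
      rw [← pvCalc_eq mid (by omega) j.toNat]; exact hv
    exact ⟨fun _ => ⟨mid, hmid1, hmid2, hv'⟩, fun _ => rfl⟩
  | case2 lo hi hlo hle mid v hne hvlt ih =>
    have hm := PySem.Int.floordiv_eq_ediv_of_pos (a := lo + hi) (b := (2:Int)) (by omega)
    have hmid1 : lo ≤ mid := by simp only [mid]; omega
    have hmid2 : mid ≤ hi := by simp only [mid]; omega
    have hveq : v = pvGeom mid j.toNat := (pvCalc_eq mid (by omega) j.toNat).symm ▸ rfl
    rw [ih]
    constructor
    · rintro ⟨x, h1, h2, h3⟩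
      exact ⟨x, by omega, h2, h3⟩
    · rintro ⟨x, h1, h2, h3⟩
      refine ⟨x, ?_, h2, h3⟩
      by_contra hc
      have hxm : x ≤ mid := by simp only [mid]; omega
      have : pvGeom x j.toNat ≤ pvGeom mid j.toNat := pvGeom_mono_b (by omega) hxm _
      omega
  | case3 lo hi hlo hle mid v hne hnlt ih =>
    have hm := PySem.Int.floordiv_eq_ediv_of_pos (a := lo + hi) (b := (2:Int)) (by omega)
    have hmid1 : lo ≤ mid := by simp only [mid]; omega
    have hmid2 : mid ≤ hi := by simp only [mid]; omega
    have hveq : v = pvGeom mid j.toNat := (pvCalc_eq mid (by omega) j.toNat).symm ▸ rfl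
    rw [ih]
    constructor
    · rintro ⟨x, h1, h2, h3⟩
      exact ⟨x, h1, by omega, h3⟩
    · rintro ⟨x, h1, h2, h3⟩
      refine ⟨x, h1, ?_, h3⟩
      by_contra hc
      have hxm : mid ≤ x := by simp only [mid]; omega
      have : pvGeom mid j.toNat ≤ pvGeom x j.toNat := pvGeom_mono_b (by omega) hxm _
      omega
  | case4 lo hi hlo hgt =>
    constructor
    · intro h
      simp at h
    · rintro ⟨x, h1, h2, -⟩
      exfalso
      omega

theorem bsearchB_snd_le (m j : Int) (hj : 4 ≤ j) (lo hi : Int) (hlo : 2 ≤ lo) :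
    (bsearchB m j hj lo hi hlo).2 ≤ hi := by
  fun_induction bsearchB m j hj lo hi hlo with
  | case1 lo hi hlo hle mid v hv => exact le_refl _
  | case2 lo hi hlo hle mid v hne hvlt ih => exact ih
  | case3 lo hi hlo hle mid v hne hnlt ih =>
    have hm := PySem.Int.floordiv_eq_ediv_of_pos (a := lo + hi) (b := (2:Int)) (by omega)
    have := ih
    omega
  | case4 lo hi hlo hgt => exact le_refl _

-- after a failed search every base above the returned bound gives a repunit larger than m
theorem bsearchB_snd_gt (m j : Int) (hj : 4 ≤ j) (lo hi : Int) (hlo : 2 ≤ lo)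
    (hf : (bsearchB m j hj lo hi hlo).1 = false) :
    ∀ x : Int, (bsearchB m j hj lo hi hlo).2 < x → x ≤ hi → m < pvGeom x j.toNat := by
  fun_induction bsearchB m j hj lo hi hlo with
  | case1 lo hi hlo hle mid v hv => simp at hf
  | case2 lo hi hlo hle mid v hne hvlt ih => exact ih hf
  | case3 lo hi hlo hle mid v hne hnlt ih =>
    intro x hx1 hx2
    have hm := PySem.Int.floordiv_eq_ediv_of_pos (a := lo + hi) (b := (2:Int)) (by omega)
    have hmid1 : lo ≤ mid := by simp only [mid]; omega
    have hmid2 : mid ≤ hi := by simp only [mid]; omega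
    have hveq : v = pvGeom mid j.toNat := (pvCalc_eq mid (by omega) j.toNat).symm ▸ rfl
    by_cases hxm : x ≤ mid - 1
    · exact ih hf x hx1 (by simp only [mid] at hxm; omega)
    · have hmx : mid ≤ x := by omega
      have : pvGeom mid j.toNat ≤ pvGeom x j.toNat := pvGeom_mono_b (by omega) hmx _
      omega
  | case4 lo hi hlo hgt =>
    intro x hx1 hx2
    exfalso
    omega

theorem seenLoop_iff (m bnd : Int) (j hi : Int) (hj : 4 ≤ j) (hle : hi ≤ bnd)
    (hinv : ∀ x : Int, hi < x → x ≤ bnd → 2 ≤ x → m < pvGeom x j.toNat) :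
    seenLoop m j hi hj = true ↔
      ∃ j' : Nat, j.toNat ≤ j' ∧ ∃ b' : Int, 2 ≤ b' ∧ b' ≤ bnd ∧ pvGeom b' j' = m := by
  fun_induction seenLoop m j hi hj with
  | case1 j hi hj h r hfound =>
    obtain ⟨x, h1, h2, h3⟩ := (bsearchB_fst_iff m j hj 2 hi (le_refl _)).mp hfound
    exact ⟨fun _ => ⟨j.toNat, le_refl _, x, h1, by omega, h3⟩, fun _ => rfl⟩
  | case2 j hi hj h r hnot ih =>
    have hr2 : r.2 ≤ hi := bsearchB_snd_le m j hj 2 hi (le_refl _)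
    have hgt := bsearchB_snd_gt m j hj 2 hi (le_refl _)
      (by cases hb : r.1; rfl; exact absurd hb hnot)
    have hc : (j + 1).toNat = j.toNat + 1 := by omega
    rw [ih (by omega) ?hinv']
    case hinv' =>
      intro x hx1 hx2 hx3
      rw [hc]
      have hmono := pvGeom_succ_ge x (by omega) j.toNat
      by_cases hxh : x ≤ hi
      · have := hgt x hx1 hxh
        omega
      · have := hinv x (by omega) hx2 hx3
        omega
    rw [hc]
    constructor
    · rintro ⟨j', h1, b', h2, h3, h4⟩
      exact ⟨j', by omega, b', h2, h3, h4⟩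
    · rintro ⟨j', h1, b', h2, h3, h4⟩
      by_cases hjj : j' = j.toNat
      · exfalso
        subst hjj
        by_cases hbh : b' ≤ hi
        · exact hnot ((bsearchB_fst_iff m j hj 2 hi (le_refl _)).mpr ⟨b', h2, hbh, h4⟩)
        · have := hinv b' (by omega) h3 h2
          omega
      · exact ⟨j', by omega, b', h2, h3, h4⟩
  | case3 j hi hj h =>
    constructor
    · intro hh
      exact absurd hh (by decide)
    · rintro ⟨j', h1, b', h2, h3, h4⟩
      exfalso
      rcases not_and_or.mp h with hh | hh
      · have := hinv b' (by omega) h3 h2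
        have h5 : pvGeom b' j.toNat ≤ pvGeom b' j' := pvGeom_mono_k b' (by omega) h1
        omega
      · have hp : (2:Int) ^ j.toNat ≤ 2 ^ j' := pow_le_pow_right₀ (by omega) h1
        have hg : pvGeom 2 j' ≤ pvGeom b' j' := pvGeom_mono_b (by omega) h2 j'
        have h2j := pvGeom_two j'
        omega

theorem seenSmaller_iff (m b : Int) : seenSmaller m b = true ↔ pvRepIn m b := by
  unfold seenSmaller pvRepIn
  rw [seenLoop_iff m (b - 1) 4 (b - 1) (by omega) (le_refl _) (by omega)]
  have hc : ((4:Int)).toNat = 4 := rfl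
  rw [hc]
  constructor
  · rintro ⟨j', h1, b', h2, h3, h4⟩
    exact ⟨b', h2, by omega, j', h1, h4⟩
  · rintro ⟨b', h2, h3, j', h1, h4⟩
    exact ⟨j', h1, b', h2, by omega, h4⟩

-- ghost list of the values Source B's inner loop adds for base b, lengths ≥ k
def pvKs (n b : Int) (hb : 2 ≤ b) (k : Int) (hk : 3 ≤ k) : List Int :=
  let m := pvRep b k
  if h : n ≤ m then []
  else (if seenSmaller m b then [] else [m]) ++ pvKs n b hb (k + 1) (by omega)
termination_by (n - pvRep b k).toNat
decreasing_by
  have hc : (k + 1).toNat = k.toNat + 1 := by omega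
  have h1 : pvRep b k = pvGeom b k.toNat := pvCalc_eq b hb k.toNat
  have h2 : pvRep b (k + 1) = pvGeom b (k.toNat + 1) := by
    rw [pvRep, hc]; exact pvCalc_eq b hb (k.toNat + 1)
  have h3 := pvGeom_succ_ge b (by omega) k.toNat
  omega

-- ghost list of all values Source B adds over bases ≥ b
def pvBs (n b : Int) (hb : 2 ≤ b) : List Int :=
  if h : pvRep b 3 < n then
    pvKs n b hb 3 (by omega) ++ pvBs n (b + 1) (by omega)
  else []
termination_by (n - pvRep b 3).toNat
decreasing_by
  have h1 : pvRep b 3 = pvGeom b 3 := pvCalc_eq b (by omega) 3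
  have h2 : pvRep (b + 1) 3 = pvGeom (b + 1) 3 := pvCalc_eq (b + 1) (by omega) 3
  have h3 := pvGeom_strict_b (b := b) (by omega) (k := 3) (by omega)
  omega

theorem loopKAlt_eq (n b : Int) (hb : 2 ≤ b) (total k : Int) (hk : 3 ≤ k) :
    loopKAlt n b hb total k hk = total + (pvKs n b hb k hk).sum := by
  fun_induction loopKAlt n b hb total k hk with
  | case1 total k hk m hstop =>
    rw [pvKs, dif_pos hstop]
    simp
  | case2 total k hk m hstop ih =>
    refine ih.trans ?_
    conv_rhs => rw [pvKs]
    rw [dif_neg hstop, List.sum_append]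
    split_ifs with hs
    · simp
    · simp only [List.sum_cons, List.sum_nil]
      ring

theorem loopBAlt_eq (n total b : Int) (hb : 2 ≤ b) :
    loopBAlt n total b hb = total + (pvBs n b hb).sum := by
  fun_induction loopBAlt n total b hb with
  | case1 total b hb hlt ih =>
    rw [ih, loopKAlt_eq]
    conv_rhs => rw [pvBs]
    rw [dif_pos hlt, List.sum_append]
    ring
  | case2 total b hb hge =>
    rw [pvBs, dif_neg hge]
    simp

theorem pvKs_mem (n b : Int) (hb : 2 ≤ b) (k : Int) (hk : 3 ≤ k) (x : Int) :
    x ∈ pvKs n b hb k hk ↔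
      ∃ j : Nat, k.toNat ≤ j ∧ x = pvGeom b j ∧ x < n ∧ ¬ pvRepIn x b := by
  fun_induction pvKs n b hb k hk with
  | case1 k hk m hstop =>
    have h1 : pvRep b k = pvGeom b k.toNat := pvCalc_eq b hb k.toNat
    have hstop' : n ≤ pvRep b k := hstop
    constructor
    · intro h
      simp at h
    rintro ⟨j, hj, rfl, hlt, -⟩
    exact absurd (pvGeom_mono_k b (by omega) hj) (by omega)
  | case2 k hk m hstop ih =>
    have h1 : pvRep b k = pvGeom b k.toNat := pvCalc_eq b hb k.toNat
    have hm : (m : Int) = pvGeom b k.toNat := h1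
    have hstop' : ¬ n ≤ pvRep b k := hstop
    rw [List.mem_append, ih]
    constructor
    · rintro (hmem | ⟨j, hj, rfl, hlt, hrep⟩)
      · split_ifs at hmem with hs
        · simp at hmem
        · have hx : x = m := by simpa using hmem
          subst hx
          exact ⟨k.toNat, le_refl _, hm, by omega,
            fun hr => by rw [← (seenSmaller_iff m b)] at hr; exact hs hr⟩
      · exact ⟨j, by omega, rfl, hlt, hrep⟩
    · rintro ⟨j, hj, rfl, hlt, hrep⟩
      by_cases hjj : j = k.toNat
      · subst hjj
        left
        have hs : seenSmaller m b = false := by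
          cases hsm : seenSmaller m b
          · rfl
          · exact absurd ((seenSmaller_iff m b).mp hsm) (by rw [hm]; exact hrep)
        rw [hs]
        simp only [Bool.false_eq_true, if_false, List.mem_singleton]
        exact hm.symm
      · exact Or.inr ⟨j, by omega, rfl, hlt, hrep⟩

theorem pvKs_nodup (n b : Int) (hb : 2 ≤ b) (k : Int) (hk : 3 ≤ k) :
    (pvKs n b hb k hk).Nodup := by
  fun_induction pvKs n b hb k hk with
  | case1 k hk m hstop => exact List.nodup_nil
  | case2 k hk m hstop ih =>
    have h1 : pvRep b k = pvGeom b k.toNat := pvCalc_eq b hb k.toNat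
    split_ifs with hs
    · simpa using ih
    · simp only [List.singleton_append, List.nodup_cons]
      refine ⟨fun hmem => ?_, ih⟩
      obtain ⟨j, hj, he, -, -⟩ := (pvKs_mem n b hb (k + 1) (by omega) m).mp hmem
      have hc : (k + 1).toNat = k.toNat + 1 := by omega
      rw [hc] at hj
      have h2 : pvGeom b (k.toNat + 1) ≤ pvGeom b j := pvGeom_mono_k b (by omega) hj
      have h3 := pvGeom_succ_ge b (by omega) k.toNat
      omega

theorem pvBs_mem (n b : Int) (hb : 2 ≤ b) (x : Int) :
    x ∈ pvBs n b hb ↔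
      ∃ b' : Int, b ≤ b' ∧ ∃ j : Nat, 3 ≤ j ∧ x = pvGeom b' j ∧ x < n ∧ ¬ pvRepIn x b' := by
  fun_induction pvBs n b hb with
  | case1 b hb hlt ih =>
    have hc : ((3:Int)).toNat = 3 := rfl
    have hks := fun x => pvKs_mem n b hb 3 (by omega) x
    rw [hc] at hks
    rw [List.mem_append, hks, ih]
    constructor
    · rintro (⟨j, hj, rfl, hlts, hrep⟩ | ⟨b', hb', j, hj, rfl, hlts, hrep⟩)
      · exact ⟨b, le_refl _, j, hj, rfl, hlts, hrep⟩
      · exact ⟨b', by omega, j, hj, rfl, hlts, hrep⟩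
    · rintro ⟨b', hb', j, hj, rfl, hlts, hrep⟩
      by_cases hbb : b' = b
      · subst hbb
        exact Or.inl ⟨j, hj, rfl, hlts, hrep⟩
      · exact Or.inr ⟨b', by omega, j, hj, rfl, hlts, hrep⟩
  | case2 b hb hge =>
    have h1 : pvRep b 3 = pvGeom b 3 := pvCalc_eq b hb 3
    constructor
    · intro h
      simp at h
    rintro ⟨b', hb', j, hj, rfl, hlts, -⟩
    exfalso
    have h2 : pvGeom b 3 ≤ pvGeom b' 3 := pvGeom_mono_b (by omega) hb' 3
    have h3 : pvGeom b' 3 ≤ pvGeom b' j := pvGeom_mono_k b' (by omega) hj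
    omega

-- a shared value forces the longer representation in the smaller base
theorem pvCross {b b' : Int} (hb' : 2 ≤ b') (h : b' < b) {j k : Nat}
    (hj : 3 ≤ j) (hk : 3 ≤ k) (he : pvGeom b' j = pvGeom b k) : 4 ≤ j := by
  by_contra hc
  have hj3 : j = 3 := by omega
  subst hj3
  have h1 : pvGeom b' 3 ≤ pvGeom b' k := pvGeom_mono_k b' (by omega) (by omega)
  have h2 : pvGeom b' k < pvGeom b k := pvGeom_lt_b (by omega) h (by omega)
  omega

theorem pvBs_nodup (n b : Int) (hb : 2 ≤ b) : (pvBs n b hb).Nodup := by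
  fun_induction pvBs n b hb with
  | case1 b hb hlt ih =>
    refine (pvKs_nodup n b hb 3 (by omega)).append ih ?_
    intro x hx1 hx2
    have hc : ((3:Int)).toNat = 3 := rfl
    obtain ⟨j, hj, rfl, -, -⟩ := (pvKs_mem n b hb 3 (by omega) x).mp hx1
    rw [hc] at hj
    obtain ⟨b2, hb2, k2, hk2, he, -, hrep⟩ := (pvBs_mem n (b + 1) (by omega) _).mp hx2
    have h4 : 4 ≤ j := pvCross hb (by omega) hj hk2 he
    exact hrep ⟨b, hb, by omega, j, h4, rfl⟩
  | case2 b hb hge => exact List.nodup_nil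

theorem pvBs_complete (n : Int) :
    ∀ t : Nat, ∀ b : Int, (b - 2).toNat = t → 2 ≤ b → ∀ j : Nat, 3 ≤ j →
      pvGeom b j < n → pvGeom b j ∈ pvBs n 2 (by omega) := by
  intro t
  induction t using Nat.strong_induction_on with
  | _ t ih =>
    intro b ht hb j hj hlt
    by_cases hrep : pvRepIn (pvGeom b j) b
    · obtain ⟨b', hb', hblt, j', hj', he⟩ := hrep
      have hmem := ih (b' - 2).toNat (by omega) b' rfl hb' j' (by omega)
        (by rw [he]; exact hlt)
      rw [← he]
      exact hmem
    · exact (pvBs_mem n 2 (by omega) _).mpr ⟨b, by omega, j, hj, rfl, hlt, hrep⟩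

theorem pvBs_ge_seven (n b : Int) (hb : 2 ≤ b) (x : Int) (hx : x ∈ pvBs n b hb) : 7 ≤ x := by
  obtain ⟨b', hb', j, hj, rfl, -, -⟩ := (pvBs_mem n b hb x).mp hx
  have h1 : pvGeom 2 3 ≤ pvGeom 2 j := pvGeom_mono_k 2 (by omega) hj
  have h2 : pvGeom 2 j ≤ pvGeom b' j := pvGeom_mono_b (by omega) (by omega) j
  have h3 : pvGeom 2 3 = 7 := by decide
  omega

-- A-side characterisation (as before)
theorem loopKA_mem (n b : Int) (hb : 2 ≤ b) (s : PySem.Set Int) (k : Int) (hk : 3 ≤ k) (x : Int) :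
    x ∈ (loopKA n b hb s k hk).1 ↔
      x ∈ s ∨ ∃ j : Nat, k.toNat ≤ j ∧ x = pvGeom b j ∧ x < n := by
  fun_induction loopKA n b hb s k hk with
  | case1 s k hk m hstop =>
    have h1 : calcRepUnit b k = pvGeom b k.toNat := pvCalc_eq b hb k.toNat
    have hstop' : n ≤ calcRepUnit b k := hstop
    constructor
    · exact fun h => Or.inl h
    · rintro (h | ⟨j, hj, rfl, hlt⟩)
      · exact h
      · exact absurd (pvGeom_mono_k b (by omega) hj) (by omega)
  | case2 s k hk m hstop ih =>
    rw [ih]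
    have h1 : calcRepUnit b k = pvGeom b k.toNat := pvCalc_eq b hb k.toNat
    have hm : (m : Int) = pvGeom b k.toNat := h1
    have hstop' : ¬ n ≤ calcRepUnit b k := hstop
    constructor
    · rintro (hmem | ⟨j, hj, rfl, hlt⟩)
      · rw [PySem.Set.mem_add] at hmem
        rcases hmem with h | rfl
        · exact Or.inl h
        · exact Or.inr ⟨k.toNat, le_refl _, hm, by omega⟩
      · exact Or.inr ⟨j, by omega, rfl, hlt⟩
    · rintro (hmem | ⟨j, hj, rfl, hlt⟩)
      · exact Or.inl (by rw [PySem.Set.mem_add]; exact Or.inl hmem)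
      · by_cases hj' : j = k.toNat
        · subst hj'
          exact Or.inl (by rw [PySem.Set.mem_add]; exact Or.inr hm.symm)
        · exact Or.inr ⟨j, by omega, rfl, hlt⟩

theorem loopKA_flag (n b : Int) (hb : 2 ≤ b) (s : PySem.Set Int) (k : Int) (hk : 3 ≤ k) :
    (loopKA n b hb s k hk).2 = true ↔ (k = 3 ∧ n ≤ pvGeom b 3) := by
  fun_induction loopKA n b hb s k hk with
  | case1 s k hk m hstop =>
    have h1 : calcRepUnit b k = pvGeom b k.toNat := pvCalc_eq b hb k.toNat
    have hstop' : n ≤ calcRepUnit b k := hstop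
    simp only [decide_eq_true_eq]
    constructor
    · intro hk3
      subst hk3
      have hc : ((3:Int)).toNat = 3 := rfl
      rw [hc] at h1
      exact ⟨rfl, by omega⟩
    · exact fun h => h.1
  | case2 s k hk m hstop ih =>
    rw [ih]
    have h1 : calcRepUnit b k = pvGeom b k.toNat := pvCalc_eq b hb k.toNat
    have hstop' : ¬ n ≤ calcRepUnit b k := hstop
    constructor
    · rintro ⟨h3, -⟩
      exact absurd h3 (by omega)
    · rintro ⟨rfl, hle⟩
      have hc : ((3:Int)).toNat = 3 := rfl
      rw [hc] at h1
      omega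

theorem loopKA_nodup (n b : Int) (hb : 2 ≤ b) (s : PySem.Set Int) (k : Int) (hk : 3 ≤ k)
    (hs : s.Nodup) : (loopKA n b hb s k hk).1.Nodup := by
  fun_induction loopKA n b hb s k hk with
  | case1 s k hk m hstop => exact hs
  | case2 s k hk m hstop ih => exact ih (PySem.Set.nodup_add _ _ hs)

theorem pvGeom_three (b : Int) : pvGeom b 3 = 1 + b + b ^ 2 := by
  simp only [pvGeom, pow_zero, pow_one]; ring

theorem loopBA_mem (n : Int) (s : PySem.Set Int) (b : Int) (hb : 2 ≤ b) (x : Int) :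
    x ∈ loopBA n s b hb ↔
      x ∈ s ∨ ∃ b' : Int, b ≤ b' ∧ ∃ j : Nat, 3 ≤ j ∧ x = pvGeom b' j ∧ x < n := by
  fun_induction loopBA n s b hb with
  | case1 s b hb hlt r hflag =>
    have hn : n ≤ pvGeom b 3 := ((loopKA_flag n b hb s 3 (by omega)).mp hflag).2
    have hc : ((3:Int)).toNat = 3 := rfl
    rw [loopKA_mem, hc]
    constructor
    · rintro (h | ⟨j, hj, rfl, hlts⟩)
      · exact Or.inl h
      · exact absurd (le_trans hn (pvGeom_mono_k b (by omega) hj)) (by omega)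
    · rintro (h | ⟨b', hb', j, hj, rfl, hlts⟩)
      · exact Or.inl h
      · exfalso
        have h1 : pvGeom b 3 ≤ pvGeom b' 3 := pvGeom_mono_b (by omega) hb' 3
        have h2 : pvGeom b' 3 ≤ pvGeom b' j := pvGeom_mono_k b' (by omega) hj
        omega
  | case2 s b hb hlt r hflag ih =>
    rw [ih]
    have hc : ((3:Int)).toNat = 3 := rfl
    have hr := fun x => loopKA_mem n b hb s 3 (by omega) x
    rw [hc] at hr
    constructor
    · rintro (hmem | ⟨b', hb', j, hj, rfl, hlts⟩)
      · rcases (hr x).mp hmem with h | ⟨j, hj, rfl, hlts⟩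
        · exact Or.inl h
        · exact Or.inr ⟨b, le_refl _, j, hj, rfl, hlts⟩
      · exact Or.inr ⟨b', by omega, j, hj, rfl, hlts⟩
    · rintro (hmem | ⟨b', hb', j, hj, rfl, hlts⟩)
      · exact Or.inl ((hr x).mpr (Or.inl hmem))
      · by_cases hbb : b' = b
        · subst hbb
          exact Or.inl ((hr _).mpr (Or.inr ⟨j, hj, rfl, hlts⟩))
        · exact Or.inr ⟨b', by omega, j, hj, rfl, hlts⟩
  | case3 s b hb hge =>
    constructor
    · exact fun h => Or.inl h
    · rintro (h | ⟨b', hb', j, hj, rfl, hlts⟩)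
      · exact h
      · exfalso
        have h1 : pvGeom b' 3 ≤ pvGeom b' j := pvGeom_mono_k b' (by omega) hj
        have h2 := pvGeom_three b'
        have h3 : b' ^ 2 = b' * b' := sq b'
        have h4 : 0 ≤ b' * b' := mul_nonneg (by omega) (by omega)
        omega

theorem loopBA_nodup (n : Int) (s : PySem.Set Int) (b : Int) (hb : 2 ≤ b)
    (hs : s.Nodup) : (loopBA n s b hb).Nodup := by
  fun_induction loopBA n s b hb with
  | case1 s b hb hlt r hflag => exact loopKA_nodup n b hb s 3 (by omega) hs
  | case2 s b hb hlt r hflag ih => exact ih (loopKA_nodup n b hb s 3 (by omega) hs)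
  | case3 s b hb hge => exact hs

-- ===== VERDICT (by name: the statement is the Claim_ definition above) =====
theorem solve_p346_spec : Claim_equal_solve_p346 := by
  intro n _
  unfold Spec_solve_p346 solve_p346 solve_p346_alt
  rw [loopBAlt_eq]
  have hsum : (1:Int) + (pvBs n 2 (by omega)).sum = (1 :: pvBs n 2 (by omega)).sum := by
    simp
  rw [hsum]
  apply List.Perm.sum_eq
  apply (List.perm_ext_iff_of_nodup _ _).mpr
  · intro x
    rw [loopBA_mem, List.mem_cons]
    constructor
    · rintro (h1 | ⟨b', hb', j, hj, rfl, hlt⟩)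
      · left
        have h2 : x ∈ PySem.Set.add PySem.Set.empty 1 := h1
        rw [PySem.Set.mem_add] at h2
        rcases h2 with h | h
        · exact absurd h (by simp [PySem.Set.empty])
        · exact h
      · exact Or.inr (pvBs_complete n (b' - 2).toNat b' rfl (by omega) j hj hlt)
    · rintro (rfl | hmem)
      · exact Or.inl (by rw [PySem.Set.mem_add]; exact Or.inr rfl)
      · rcases (pvBs_mem n 2 (by omega) x).mp hmem with ⟨b', hb', j, hj, rfl, hlt, -⟩
        exact Or.inr ⟨b', hb', j, hj, rfl, hlt⟩
  · exact loopBA_nodup _ _ _ _ (by decide)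
  · exact List.nodup_cons.mpr ⟨fun h => by have := pvBs_ge_seven n 2 (by omega) 1 h; omega,
      pvBs_nodup n 2 (by omega)⟩
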